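-- pv_equiv track=rewrite | github.com/nkukarl/lintcode | Q32.py | helper
-- ===== SOURCE A (Python) =====
-- def helper(s, t):
-- 	sDict, tDict = {}, {}
-- 	for char in s:
-- 		sDict[char] = sDict.get(char, 0) + 1
-- 	for char in t:
-- 		tDict[char] = tDict.get(char, 0) + 1
-- 	for char in tDict:
-- 		if sDict.get(char, 0) < tDict[char]:
-- 			return False
-- 	return True
-- ===== SOURCE B (Python) =====
-- def helper(s, t):
--     avail = {}
--     for ch in s:
--         avail[ch] = avail.get(ch, 0) + 1
--     for ch in t:
--         n = avail.get(ch, 0)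
--         if n == 0:
--             return False
--         avail[ch] = n - 1
--     return True
-- ===== Notes on version B (the rewrite author's own statement) =====
-- stated objective: simpler
-- what changed: B keeps a single dict of s's character counts and fuses counting t and comparing into one decrementing pass with early exit, instead of A's three loops over two dicts.
import Mathlib
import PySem

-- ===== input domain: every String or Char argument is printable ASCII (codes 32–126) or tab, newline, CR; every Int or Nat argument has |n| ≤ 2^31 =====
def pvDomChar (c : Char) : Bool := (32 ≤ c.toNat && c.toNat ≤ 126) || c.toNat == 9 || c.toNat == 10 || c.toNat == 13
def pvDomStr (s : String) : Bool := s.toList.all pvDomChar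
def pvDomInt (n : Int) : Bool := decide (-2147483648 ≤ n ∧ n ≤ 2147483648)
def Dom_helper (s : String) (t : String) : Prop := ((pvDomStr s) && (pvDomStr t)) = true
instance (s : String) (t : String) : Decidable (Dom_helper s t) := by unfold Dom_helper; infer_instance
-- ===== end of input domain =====

-- B replaces A's three loops over two count-dicts by one count-dict of s and a single
-- decrementing pass over t with early exit (objective: simpler).

-- ===== PORT A =====
-- the final 'for char in tDict: if …: return False' loop of A
def helperCheck (sD tD : PySem.Dict Char Int) : List Char → Bool
  | [] => true
  | c :: rest => if sD.getD c 0 < tD.getD c 0 then false else helperCheck sD tD rest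

def helper (s : String) (t : String) : Bool :=
  let sDict := s.toList.foldl (fun d c => d.insert c (d.getD c 0 + 1)) (PySem.Dict.empty : PySem.Dict Char Int)
  let tDict := t.toList.foldl (fun d c => d.insert c (d.getD c 0 + 1)) (PySem.Dict.empty : PySem.Dict Char Int)
  helperCheck sDict tDict tDict.keys

-- ===== PORT B =====
-- B's single pass over t: look up, bail out on 0, otherwise decrement
def helperConsume (d : PySem.Dict Char Int) : List Char → Bool
  | [] => true
  | c :: rest =>
    let n := d.getD c 0
    if n == 0 then false else helperConsume (d.insert c (n - 1)) rest

def helper_alt (s : String) (t : String) : Bool :=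
  let avail := s.toList.foldl (fun d c => d.insert c (d.getD c 0 + 1)) (PySem.Dict.empty : PySem.Dict Char Int)
  helperConsume avail t.toList

-- ===== PRECONDITION & SPEC =====
def Spec_helper (s : String) (t : String) (out : Bool) : Prop := out = helper_alt s t
instance (s : String) (t : String) (out : Bool) : Decidable (Spec_helper s t out) := by unfold Spec_helper; infer_instance

-- ===== CLAIM (what is proved, stated in full; the proofs are below) =====
def Claim_equal_helper : Prop := ∀ (s : String) (t : String), Dom_helper s t → Spec_helper s t (helper s t)

-- ===== LEMMAS AND PROOFS =====

-- the counting fold computes occurrence counts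
lemma countFold_getD (l : List Char) (d : PySem.Dict Char Int) (c : Char) :
    (l.foldl (fun d c => d.insert c (d.getD c 0 + 1)) d).getD c 0 = d.getD c 0 + l.count c := by
  induction l generalizing d with
  | nil => simp
  | cons x rest ih =>
    simp only [List.foldl_cons, ih, PySem.Dict.getD_insert, List.count_cons]
    by_cases h : c = x
    · simp [h]; ring
    · simp [h, show ¬ (x == c) by simpa using Ne.symm h]

lemma countFold_keys (l : List Char) (d : PySem.Dict Char Int) (c : Char) :
    c ∈ (l.foldl (fun d c => d.insert c (d.getD c 0 + 1)) d).keys ↔ c ∈ d.keys ∨ c ∈ l := by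
  induction l generalizing d with
  | nil => simp
  | cons x rest ih =>
    simp only [List.foldl_cons, ih, PySem.Dict.mem_keys_insert, List.mem_cons]
    tauto

lemma helperCheck_spec (sD tD : PySem.Dict Char Int) (l : List Char) :
    helperCheck sD tD l = true ↔ ∀ c ∈ l, ¬ sD.getD c 0 < tD.getD c 0 := by
  induction l with
  | nil => simp [helperCheck]
  | cons x rest ih =>
    simp only [helperCheck]
    by_cases h : sD.getD x 0 < tD.getD x 0
    · rw [if_pos h]
      constructor
      · intro hf; cases hf
      · intro hall; exact absurd h (hall x List.mem_cons_self)
    · rw [if_neg h, ih]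
      constructor
      · intro hr c hc
        rcases List.mem_cons.1 hc with rfl | hc
        · exact h
        · exact hr c hc
      · intro hall c hc
        exact hall c (List.mem_cons_of_mem _ hc)

-- count of a cons, as an Int inequality helper
lemma count_cons_int (c x : Char) (rest : List Char) :
    ((x :: rest).count c : Int) = (rest.count c : Int) + (if c = x then 1 else 0) := by
  rw [List.count_cons]
  by_cases h : c = x
  · simp [h]
  · simp [h, show ¬ (x == c) by simpa using Ne.symm h]

lemma helperConsume_spec (l : List Char) (d : PySem.Dict Char Int)
    (hd : ∀ c, 0 ≤ d.getD c 0) :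
    helperConsume d l = true ↔ ∀ c : Char, (l.count c : Int) ≤ d.getD c 0 := by
  induction l generalizing d with
  | nil => simpa [helperConsume] using hd
  | cons x rest ih =>
    have hins : ∀ c, (d.insert x (d.getD x 0 - 1)).getD c 0
        = if c = x then d.getD x 0 - 1 else d.getD c 0 :=
      fun c => PySem.Dict.getD_insert d x c (d.getD x 0 - 1) 0
    by_cases h : d.getD x 0 = 0
    · rw [show helperConsume d (x :: rest) = false from by simp [helperConsume, h]]
      simp only [Bool.false_eq_true, false_iff, not_forall]
      refine ⟨x, ?_⟩
      rw [count_cons_int]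
      simp [h]
    · have hpos : 1 ≤ d.getD x 0 := by have := hd x; omega
      have hd' : ∀ c, 0 ≤ (d.insert x (d.getD x 0 - 1)).getD c 0 := by
        intro c
        rw [hins c]
        split_ifs with hc
        · omega
        · exact hd c
      simp only [helperConsume, beq_iff_eq, h, if_false]
      rw [ih _ hd']
      constructor
      · intro hall c
        have := hall c
        rw [hins c] at this
        rw [count_cons_int]
        by_cases hc : c = x
        · simp [hc] at this ⊢; omega
        · simp [hc] at this ⊢; omega
      · intro hall c
        have := hall c
        rw [count_cons_int] at this
        rw [hins c]
        by_cases hc : c = x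
        · simp [hc] at this ⊢; omega
        · simp [hc] at this ⊢; omega

lemma helper_iff (s t : String) :
    helper s t = true ↔ ∀ c : Char, (t.toList.count c : Int) ≤ s.toList.count c := by
  unfold helper
  rw [helperCheck_spec]
  constructor
  · intro h c
    by_cases hc : c ∈ t.toList
    · have hk : c ∈ (t.toList.foldl (fun d c => d.insert c (d.getD c 0 + 1))
          (PySem.Dict.empty : PySem.Dict Char Int)).keys := by
        rw [countFold_keys]; simp [hc]
      have := h c hk
      rw [countFold_getD, countFold_getD] at this
      simp at this
      omega
    · rw [List.count_eq_zero.2 hc]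
      positivity
  · intro h c _
    rw [countFold_getD, countFold_getD]
    have := h c
    simp
    omega

lemma helper_alt_iff (s t : String) :
    helper_alt s t = true ↔ ∀ c : Char, (t.toList.count c : Int) ≤ s.toList.count c := by
  unfold helper_alt
  rw [helperConsume_spec]
  · constructor
    · intro h c; have := h c; rw [countFold_getD] at this; simpa using this
    · intro h c; rw [countFold_getD]; simpa using h c
  · intro c; rw [countFold_getD]; simp

-- ===== VERDICT (by name: the statement is the Claim_ definition above) =====
theorem helper_spec : Claim_equal_helper := by
  intro s t _
  unfold Spec_helper
  rw [Bool.eq_iff_iff, helper_iff, helper_alt_iff]
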